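-- pv_equiv track=rewrite | github.com/ahansen2014/AESExample | convertBytesToText.py | convertWordToText
-- ===== SOURCE A (Python) =====
-- chars = ['0', '1', '2', '3','4', '5', '6', '7', '8', '9', 'a', 'b', 'c', 'd', 'e', 'f']
--
-- def convertWordToText(word):
--     string = ''
--     for i in range(len(word)):
--
--         index = int(word[i] / 16)
--         string = string + chars[index]
--         index = word[i] % 16
--         string = string + chars[index]
--
--     return string
-- ===== SOURCE B (Python) =====
-- def convertWordToText(word):
--     return bytes(word).hex()
-- ===== Notes on version B (the rewrite author's own statement) =====
-- stated objective: idiomatic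
-- what changed: Replaces the manual per-byte divide/modulo/table-lookup/string-concatenation loop with the standard library's bytes(word).hex(), which converts the whole byte sequence to lowercase hex in one call.
-- outside the precondition, e.g. on convertWordToText([-15]): A returns '01', B raises ValueError; on convertWordToText([-16]): A returns 'f0', B raises ValueError
import Mathlib
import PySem

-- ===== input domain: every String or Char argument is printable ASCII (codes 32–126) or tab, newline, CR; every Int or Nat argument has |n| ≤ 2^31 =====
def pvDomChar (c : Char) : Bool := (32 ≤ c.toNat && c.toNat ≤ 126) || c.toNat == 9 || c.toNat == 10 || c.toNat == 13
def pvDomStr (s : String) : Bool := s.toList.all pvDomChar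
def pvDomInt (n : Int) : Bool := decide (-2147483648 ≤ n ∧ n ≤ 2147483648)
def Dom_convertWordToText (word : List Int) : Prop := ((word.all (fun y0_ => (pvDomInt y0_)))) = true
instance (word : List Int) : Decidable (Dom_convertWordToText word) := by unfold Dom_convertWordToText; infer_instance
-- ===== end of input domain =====

-- B replaces A's manual divide/modulo/table-lookup/string-concatenation loop by the idiomatic
-- bytes(word).hex() library call (one pass building the hex characters directly).

-- ===== PORT A =====
-- module-level table of hex digit strings
def chars : List String :=
  ["0", "1", "2", "3", "4", "5", "6", "7", "8", "9", "a", "b", "c", "d", "e", "f"]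

-- int(x / 16): exact float division then truncation toward zero = Int.tdiv on the |x| ≤ 2^31 domain.
-- chars[index] uses PySem.List.pyGet? (negative index from the end; none = IndexError, excluded by Pre_).
def convertWordToText (word : List Int) : String :=
  word.foldl (fun string x =>
    let index1 : Int := Int.tdiv x 16
    let string := string ++ (PySem.List.pyGet? chars index1).getD ""
    let index2 : Int := PySem.Int.mod x 16
    string ++ (PySem.List.pyGet? chars index2).getD "") ""

-- ===== PORT B =====
-- bytes(word).hex(): each byte becomes its two lowercase hex digits, in order.
def hexDigit (n : Nat) : Char :=
  (['0', '1', '2', '3', '4', '5', '6', '7', '8', '9', 'a', 'b', 'c', 'd', 'e', 'f']).getD n ' '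

def convertWordToText_alt (word : List Int) : String :=
  String.ofList (word.flatMap (fun b => [hexDigit (b.toNat / 16), hexDigit (b.toNat % 16)]))

-- ===== PRECONDITION & SPEC =====
-- Pre_ excludes elements outside 0..255: above 255 (and below -271) A raises IndexError; on -271..-1
-- A still returns a value, but only via Python's negative-index wraparound into the chars table, and
-- B's bytes(word) itself raises ValueError there (see Raises_/cites).
def Pre_convertWordToText (word : List Int) : Prop :=
  ∀ x ∈ word, 0 ≤ x ∧ x ≤ 255
instance (word : List Int) : Decidable (Pre_convertWordToText word) := by
  unfold Pre_convertWordToText; infer_instance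

def pvWitness_convertWordToText : List Int := [0, 15, 16, 171, 255]

def Spec_convertWordToText (word : List Int) (out : String) : Prop := out = convertWordToText_alt word
instance (word : List Int) (out : String) : Decidable (Spec_convertWordToText word out) := by unfold Spec_convertWordToText; infer_instance

-- ===== CLAIM (what is proved, stated in full; the proofs are below) =====
def Claim_equal_convertWordToText : Prop := ∀ (word : List Int), Dom_convertWordToText word → Pre_convertWordToText word → Spec_convertWordToText word (convertWordToText word)

-- ===== LEMMAS AND PROOFS =====

-- per-digit agreement: A's chars-table string for a digit 0..15 is B's single hex char
theorem digit_agree (d : Int) (h0 : 0 ≤ d) (h1 : d < 16) :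
    (PySem.List.pyGet? chars d).getD "" = String.ofList [hexDigit d.toNat] := by
  interval_cases d <;> decide

theorem step_agree (x : Int) (h0 : 0 ≤ x) (h1 : x ≤ 255) (s : String) :
    (s ++ (PySem.List.pyGet? chars (Int.tdiv x 16)).getD "") ++
      (PySem.List.pyGet? chars (PySem.Int.mod x 16)).getD "" =
    s ++ String.ofList [hexDigit (x.toNat / 16), hexDigit (x.toNat % 16)] := by
  have hq : Int.tdiv x 16 = ((x.toNat / 16 : Nat) : Int) := by
    rw [show x = ((x.toNat : Nat) : Int) by omega]; rfl
  have hm : PySem.Int.mod x 16 = ((x.toNat % 16 : Nat) : Int) := by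
    rw [PySem.Int.mod_eq_emod_of_pos (by norm_num : (0:Int) < 16)]; omega
  rw [hq, hm, digit_agree _ (by positivity) (by omega),
      digit_agree _ (by positivity) (by omega)]
  simp only [Int.toNat_natCast]
  rw [String.append_assoc, ← String.ofList_append]
  rfl

theorem foldl_agree (word : List Int) (hp : ∀ x ∈ word, 0 ≤ x ∧ x ≤ 255) (s : String) :
    word.foldl (fun string x =>
      let index1 : Int := Int.tdiv x 16
      let string := string ++ (PySem.List.pyGet? chars index1).getD ""
      let index2 : Int := PySem.Int.mod x 16
      string ++ (PySem.List.pyGet? chars index2).getD "") s =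
    s ++ String.ofList (word.flatMap (fun b => [hexDigit (b.toNat / 16), hexDigit (b.toNat % 16)])) := by
  induction word generalizing s with
  | nil =>
    simp only [List.foldl_nil, List.flatMap_nil]
    rw [show String.ofList ([] : List Char) = "" from rfl]
    simp
  | cons x xs ih =>
    have hx := hp x (by simp)
    simp only [List.foldl_cons]
    rw [ih (fun y hy => hp y (by simp [hy]))]
    show ((s ++ _) ++ _) ++ _ = _
    rw [step_agree x hx.1 hx.2 s, List.flatMap_cons, String.append_assoc,
        ← String.ofList_append]

-- ===== VERDICT (by name: the statement is the Claim_ definition above) =====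
theorem convertWordToText_spec : Claim_equal_convertWordToText := by
  intro word _ hpre
  show convertWordToText word = convertWordToText_alt word
  unfold convertWordToText convertWordToText_alt
  rw [foldl_agree word hpre ""]
  simp
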